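-- pv_equiv track=rewrite | github.com/louxinye/DalouBot_getmap | test/getmap.py | modIdCal
-- ===== SOURCE A (Python) =====
-- def modIdCal(mod_name):
--     if mod_name == 'None' or mod_name == 'none' or mod_name == 'NONE':
--         return 0
--     if not mod_name:
--         return -999
--     if len(mod_name)%2 != 0:
--         return -1
--     num = int(len(mod_name)/2)
--     mod_id = 0
--     mod_pick = [0,0,0,0,0,0]
--     for i in range(num):
--         get = mod_name[2*i: 2*i+2]
--         if get == 'hd' or get == 'HD':
--             if mod_pick[0] == 0:
--                 mod_pick[0] = 1
--             else:
--                 return -1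
--         elif get == 'nf' or get == 'NF' or get == 'sd' or get == 'SD' or get == 'pf' or get == 'PF':
--             if mod_pick[1] == 0:
--                 mod_pick[1] = 1
--             else:
--                 return -1
--         elif get == 'so' or get == 'SO':
--             if mod_pick[2] == 0:
--                 mod_pick[2] = 1
--             else:
--                 return -1
--         elif get == 'nc' or get == 'NC'or get == 'dt' or get == 'DT':
--             if mod_pick[3] == 0:
--                 mod_pick[3] = 1
--             else:
--                 return -1
--             mod_id = mod_id + 64
--         elif get == 'ht' or get == 'HT':
--             if mod_pick[3] == 0:
--                 mod_pick[3] = 1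
--             else:
--                 return -1
--             mod_id = mod_id + 256
--         elif get == 'hr' or get == 'HR':
--             if mod_pick[4] == 0:
--                 mod_pick[4] = 1
--             else:
--                 return -1
--             mod_id = mod_id + 16
--         elif get == 'ez' or get == 'EZ':
--             if mod_pick[4] == 0:
--                 mod_pick[4] = 1
--             else:
--                 return -1
--             mod_id = mod_id + 2
--         elif get == 'fl' or get == 'FL':
--             if mod_pick[5] == 0:
--                 mod_pick[5] = 1
--             else:
--                 return -1
--             mod_id = mod_id + 1024
--         else:
--             return -1
--     return mod_id
-- ===== SOURCE B (Python) =====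
-- # B: recursive-descent parser. A helper consumes one token per call, threading an
-- # immutable set of used mod groups, returns None on any error and composes the mod
-- # value on the way back up; the wrapper translates None to -1. No flag array, no
-- # early -1 returns, no post-loop check -- a different decomposition of the same task.
-- _TOK = {}
-- for _lo, _grp, _val in [('hd', 0, 0), ('nf', 1, 0), ('sd', 1, 0), ('pf', 1, 0),
--                         ('so', 2, 0), ('nc', 3, 64), ('dt', 3, 64), ('ht', 3, 256),
--                         ('hr', 4, 16), ('ez', 4, 2), ('fl', 5, 1024)]:
--     _TOK[_lo] = (_grp, _val)
--     _TOK[_lo.upper()] = (_grp, _val)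
--
-- def _parse(s, used):
--     if not s:
--         return 0
--     entry = _TOK.get(s[:2])
--     if entry is None:
--         return None
--     grp, val = entry
--     if grp in used:
--         return None
--     rest = _parse(s[2:], used | {grp})
--     return None if rest is None else val + rest
--
-- def modIdCal(mod_name):
--     if mod_name == 'None' or mod_name == 'none' or mod_name == 'NONE':
--         return 0
--     if not mod_name:
--         return -999
--     if len(mod_name) % 2 != 0:
--         return -1
--     r = _parse(mod_name, frozenset())
--     return -1 if r is None else r
-- ===== Notes on version B (the rewrite author's own statement) =====
-- stated objective: alternative
-- what changed: Replaces A's fused imperative scan (17-branch elif chain mutating a 6-flag array with immediate -1 returns) by a recursive-descent parser: a helper consumes one token per call, threads an immutable set of used groups, propagates None for errors and composes the value on return; the wrapper maps None to -1.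
import Mathlib
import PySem

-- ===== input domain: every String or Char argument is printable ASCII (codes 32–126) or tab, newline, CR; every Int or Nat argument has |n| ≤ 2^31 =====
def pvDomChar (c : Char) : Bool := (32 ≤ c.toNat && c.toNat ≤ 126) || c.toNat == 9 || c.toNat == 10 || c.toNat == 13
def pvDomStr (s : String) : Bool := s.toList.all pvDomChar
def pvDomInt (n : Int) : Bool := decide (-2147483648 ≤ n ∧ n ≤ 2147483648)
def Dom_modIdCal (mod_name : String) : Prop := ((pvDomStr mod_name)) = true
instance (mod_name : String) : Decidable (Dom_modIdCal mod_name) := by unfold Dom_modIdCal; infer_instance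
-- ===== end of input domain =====

-- B replaces A's fused imperative scan (flag array, immediate -1 returns) by a
-- recursive-descent parser threading an immutable used-group set and composing the
-- value on return (None propagated for errors); same return value everywhere.

-- ===== PORT A =====
-- A's for-loop over i in range(num): each iteration consumes one two-char slice;
-- ported as structural recursion eating two chars per step over the same state
-- (mod_id, mod_pick as a 6-element List Int). The one-char leftover case is
-- unreachable (A's len%2 guard); A never enters the loop body there.
def modIdCalLoopA : List Char → Int → List Int → Int
  | [], mod_id, _ => mod_id
  | [_], _, _ => -1
  | c1 :: c2 :: rest, mod_id, pick =>
    let get := [c1, c2]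
    if get = ['h','d'] ∨ get = ['H','D'] then
      if pick.getD 0 0 = 0 then modIdCalLoopA rest mod_id (pick.set 0 1) else -1
    else if get = ['n','f'] ∨ get = ['N','F'] ∨ get = ['s','d'] ∨ get = ['S','D'] ∨ get = ['p','f'] ∨ get = ['P','F'] then
      if pick.getD 1 0 = 0 then modIdCalLoopA rest mod_id (pick.set 1 1) else -1
    else if get = ['s','o'] ∨ get = ['S','O'] then
      if pick.getD 2 0 = 0 then modIdCalLoopA rest mod_id (pick.set 2 1) else -1
    else if get = ['n','c'] ∨ get = ['N','C'] ∨ get = ['d','t'] ∨ get = ['D','T'] then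
      if pick.getD 3 0 = 0 then modIdCalLoopA rest (mod_id + 64) (pick.set 3 1) else -1
    else if get = ['h','t'] ∨ get = ['H','T'] then
      if pick.getD 3 0 = 0 then modIdCalLoopA rest (mod_id + 256) (pick.set 3 1) else -1
    else if get = ['h','r'] ∨ get = ['H','R'] then
      if pick.getD 4 0 = 0 then modIdCalLoopA rest (mod_id + 16) (pick.set 4 1) else -1
    else if get = ['e','z'] ∨ get = ['E','Z'] then
      if pick.getD 4 0 = 0 then modIdCalLoopA rest (mod_id + 2) (pick.set 4 1) else -1
    else if get = ['f','l'] ∨ get = ['F','L'] then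
      if pick.getD 5 0 = 0 then modIdCalLoopA rest (mod_id + 1024) (pick.set 5 1) else -1
    else -1

def modIdCal (mod_name : String) : Int :=
  if mod_name.toList = "None".toList ∨ mod_name.toList = "none".toList ∨ mod_name.toList = "NONE".toList then 0
  else if mod_name.toList = [] then -999
  else if mod_name.toList.length % 2 ≠ 0 then -1
  else modIdCalLoopA mod_name.toList 0 [0,0,0,0,0,0]

-- ===== PORT B =====
-- B's module-level _TOK: each two-char token spelling ↦ (group, value).
def modTable : PySem.Dict (List Char) (Int × Int) :=
  ⟨[(['h','d'],(0,0)), (['H','D'],(0,0)),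
    (['n','f'],(1,0)), (['N','F'],(1,0)), (['s','d'],(1,0)), (['S','D'],(1,0)),
    (['p','f'],(1,0)), (['P','F'],(1,0)),
    (['s','o'],(2,0)), (['S','O'],(2,0)),
    (['n','c'],(3,64)), (['N','C'],(3,64)), (['d','t'],(3,64)), (['D','T'],(3,64)),
    (['h','t'],(3,256)), (['H','T'],(3,256)),
    (['h','r'],(4,16)), (['H','R'],(4,16)),
    (['e','z'],(4,2)), (['E','Z'],(4,2)),
    (['f','l'],(5,1024)), (['F','L'],(5,1024))]⟩

-- B's _parse: one token per call, immutable used-group set, None for errors,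
-- value composed on the way back. s[:2] of a 1-char string is that 1-char string,
-- never a key of the table, so the [_] arm returns none, like _parse.
def parseB : List Char → List Int → Option Int
  | [], _ => some 0
  | [_], _ => none
  | c1 :: c2 :: rest, used =>
    match PySem.Dict.get? modTable [c1, c2] with
    | none => none
    | some (g, v) =>
      if g ∈ used then none
      else (parseB rest (PySem.Set.add used g)).map (fun r => v + r)

def modIdCal_alt (mod_name : String) : Int :=
  if mod_name.toList = "None".toList ∨ mod_name.toList = "none".toList ∨ mod_name.toList = "NONE".toList then 0
  else if mod_name.toList = [] then -999
  else if mod_name.toList.length % 2 ≠ 0 then -1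
  else
    match parseB mod_name.toList [] with
    | none => -1
    | some r => r

-- ===== PRECONDITION & SPEC =====
def Spec_modIdCal (mod_name : String) (out : Int) : Prop := out = modIdCal_alt mod_name
instance (mod_name : String) (out : Int) : Decidable (Spec_modIdCal mod_name out) := by unfold Spec_modIdCal; infer_instance

-- ===== CLAIM (what is proved, stated in full; the proofs are below) =====
def Claim_equal_modIdCal : Prop := ∀ (mod_name : String), Dom_modIdCal mod_name → Spec_modIdCal mod_name (modIdCal mod_name)

-- ===== LEMMAS AND PROOFS =====

-- A's mod_pick state as a function of B's used-group set.
def pickOf (used : List Int) : List Int :=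
  [if (0:Int) ∈ used then 1 else 0, if (1:Int) ∈ used then 1 else 0,
   if (2:Int) ∈ used then 1 else 0, if (3:Int) ∈ used then 1 else 0,
   if (4:Int) ∈ used then 1 else 0, if (5:Int) ∈ used then 1 else 0]

lemma pickOf_getD (used : List Int) (k : Nat) (hk : k < 6) :
    (pickOf used).getD k 0 = if ((k : Int) ∈ used) then 1 else 0 := by
  interval_cases k <;> simp [pickOf]

lemma pickOf_set (used : List Int) (k : Nat) (hk : k < 6) :
    (pickOf used).set k 1 = pickOf (used ++ [(k : Int)]) := by
  interval_cases k <;> simp [pickOf, List.mem_append]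

lemma step_eq (rest : List Char) (used : List Int) (total : Int)
    (k : Nat) (hk : k < 6) (v : Int)
    (IH : ∀ used total, modIdCalLoopA rest total (pickOf used) =
      (match parseB rest used with | none => -1 | some r => total + r)) :
    (if (pickOf used).getD k 0 = 0 then modIdCalLoopA rest (total + v) ((pickOf used).set k 1) else -1)
      = (match (if ((k : Int) ∈ used) then none
                else (parseB rest (PySem.Set.add used (k : Int))).map (fun r => v + r)) with
         | none => -1 | some r => total + r) := by
  rw [pickOf_getD used k hk, pickOf_set used k hk]
  by_cases hm : ((k : Int) ∈ used)
  · simp [hm]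
  · rw [if_pos (by simp [hm]), if_neg hm]
    have hadd : PySem.Set.add used (k : Int) = used ++ [(k : Int)] := by
      simp [PySem.Set.add, hm]
    rw [hadd, IH (used ++ [(k : Int)]) (total + v)]
    cases parseB rest (used ++ [(k : Int)]) with
    | none => simp
    | some r => simp; ring

lemma loop_eq : ∀ (toks : List Char) (used : List Int) (total : Int),
    modIdCalLoopA toks total (pickOf used) =
      (match parseB toks used with | none => -1 | some r => total + r)
  | [], used, total => by simp [modIdCalLoopA, parseB]
  | [c], used, total => by simp [modIdCalLoopA, parseB]
  | c1 :: c2 :: rest, used, total => by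
      have IH : ∀ used total, modIdCalLoopA rest total (pickOf used) =
          (match parseB rest used with | none => -1 | some r => total + r) :=
        fun used total => loop_eq rest used total
      by_cases e1 : ([c1, c2] : List Char) = ['h','d']
      · obtain ⟨rfl, rfl⟩ : c1 = 'h' ∧ c2 = 'd' := by simpa using e1
        have hA : modIdCalLoopA ('h'::'d'::rest) total (pickOf used)
            = (if (pickOf used).getD 0 0 = 0 then modIdCalLoopA rest (total + 0) ((pickOf used).set 0 1) else -1) := by
          simp [modIdCalLoopA]
        have hget : PySem.Dict.get? modTable ['h','d'] = some ((0:Int),(0:Int)) := by decide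
        rw [hA]; simp only [parseB]; rw [hget]
        simpa using step_eq rest used total 0 (by omega) 0 IH
      by_cases e2 : ([c1, c2] : List Char) = ['H','D']
      · obtain ⟨rfl, rfl⟩ : c1 = 'H' ∧ c2 = 'D' := by simpa using e2
        have hA : modIdCalLoopA ('H'::'D'::rest) total (pickOf used)
            = (if (pickOf used).getD 0 0 = 0 then modIdCalLoopA rest (total + 0) ((pickOf used).set 0 1) else -1) := by
          simp [modIdCalLoopA]
        have hget : PySem.Dict.get? modTable ['H','D'] = some ((0:Int),(0:Int)) := by decide
        rw [hA]; simp only [parseB]; rw [hget]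
        simpa using step_eq rest used total 0 (by omega) 0 IH
      by_cases e3 : ([c1, c2] : List Char) = ['n','f']
      · obtain ⟨rfl, rfl⟩ : c1 = 'n' ∧ c2 = 'f' := by simpa using e3
        have hA : modIdCalLoopA ('n'::'f'::rest) total (pickOf used)
            = (if (pickOf used).getD 1 0 = 0 then modIdCalLoopA rest (total + 0) ((pickOf used).set 1 1) else -1) := by
          simp [modIdCalLoopA]
        have hget : PySem.Dict.get? modTable ['n','f'] = some ((1:Int),(0:Int)) := by decide
        rw [hA]; simp only [parseB]; rw [hget]
        simpa using step_eq rest used total 1 (by omega) 0 IH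
      by_cases e4 : ([c1, c2] : List Char) = ['N','F']
      · obtain ⟨rfl, rfl⟩ : c1 = 'N' ∧ c2 = 'F' := by simpa using e4
        have hA : modIdCalLoopA ('N'::'F'::rest) total (pickOf used)
            = (if (pickOf used).getD 1 0 = 0 then modIdCalLoopA rest (total + 0) ((pickOf used).set 1 1) else -1) := by
          simp [modIdCalLoopA]
        have hget : PySem.Dict.get? modTable ['N','F'] = some ((1:Int),(0:Int)) := by decide
        rw [hA]; simp only [parseB]; rw [hget]
        simpa using step_eq rest used total 1 (by omega) 0 IH
      by_cases e5 : ([c1, c2] : List Char) = ['s','d']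
      · obtain ⟨rfl, rfl⟩ : c1 = 's' ∧ c2 = 'd' := by simpa using e5
        have hA : modIdCalLoopA ('s'::'d'::rest) total (pickOf used)
            = (if (pickOf used).getD 1 0 = 0 then modIdCalLoopA rest (total + 0) ((pickOf used).set 1 1) else -1) := by
          simp [modIdCalLoopA]
        have hget : PySem.Dict.get? modTable ['s','d'] = some ((1:Int),(0:Int)) := by decide
        rw [hA]; simp only [parseB]; rw [hget]
        simpa using step_eq rest used total 1 (by omega) 0 IH
      by_cases e6 : ([c1, c2] : List Char) = ['S','D']
      · obtain ⟨rfl, rfl⟩ : c1 = 'S' ∧ c2 = 'D' := by simpa using e6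
        have hA : modIdCalLoopA ('S'::'D'::rest) total (pickOf used)
            = (if (pickOf used).getD 1 0 = 0 then modIdCalLoopA rest (total + 0) ((pickOf used).set 1 1) else -1) := by
          simp [modIdCalLoopA]
        have hget : PySem.Dict.get? modTable ['S','D'] = some ((1:Int),(0:Int)) := by decide
        rw [hA]; simp only [parseB]; rw [hget]
        simpa using step_eq rest used total 1 (by omega) 0 IH
      by_cases e7 : ([c1, c2] : List Char) = ['p','f']
      · obtain ⟨rfl, rfl⟩ : c1 = 'p' ∧ c2 = 'f' := by simpa using e7
        have hA : modIdCalLoopA ('p'::'f'::rest) total (pickOf used)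
            = (if (pickOf used).getD 1 0 = 0 then modIdCalLoopA rest (total + 0) ((pickOf used).set 1 1) else -1) := by
          simp [modIdCalLoopA]
        have hget : PySem.Dict.get? modTable ['p','f'] = some ((1:Int),(0:Int)) := by decide
        rw [hA]; simp only [parseB]; rw [hget]
        simpa using step_eq rest used total 1 (by omega) 0 IH
      by_cases e8 : ([c1, c2] : List Char) = ['P','F']
      · obtain ⟨rfl, rfl⟩ : c1 = 'P' ∧ c2 = 'F' := by simpa using e8
        have hA : modIdCalLoopA ('P'::'F'::rest) total (pickOf used)
            = (if (pickOf used).getD 1 0 = 0 then modIdCalLoopA rest (total + 0) ((pickOf used).set 1 1) else -1) := by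
          simp [modIdCalLoopA]
        have hget : PySem.Dict.get? modTable ['P','F'] = some ((1:Int),(0:Int)) := by decide
        rw [hA]; simp only [parseB]; rw [hget]
        simpa using step_eq rest used total 1 (by omega) 0 IH
      by_cases e9 : ([c1, c2] : List Char) = ['s','o']
      · obtain ⟨rfl, rfl⟩ : c1 = 's' ∧ c2 = 'o' := by simpa using e9
        have hA : modIdCalLoopA ('s'::'o'::rest) total (pickOf used)
            = (if (pickOf used).getD 2 0 = 0 then modIdCalLoopA rest (total + 0) ((pickOf used).set 2 1) else -1) := by
          simp [modIdCalLoopA]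
        have hget : PySem.Dict.get? modTable ['s','o'] = some ((2:Int),(0:Int)) := by decide
        rw [hA]; simp only [parseB]; rw [hget]
        simpa using step_eq rest used total 2 (by omega) 0 IH
      by_cases e10 : ([c1, c2] : List Char) = ['S','O']
      · obtain ⟨rfl, rfl⟩ : c1 = 'S' ∧ c2 = 'O' := by simpa using e10
        have hA : modIdCalLoopA ('S'::'O'::rest) total (pickOf used)
            = (if (pickOf used).getD 2 0 = 0 then modIdCalLoopA rest (total + 0) ((pickOf used).set 2 1) else -1) := by
          simp [modIdCalLoopA]
        have hget : PySem.Dict.get? modTable ['S','O'] = some ((2:Int),(0:Int)) := by decide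
        rw [hA]; simp only [parseB]; rw [hget]
        simpa using step_eq rest used total 2 (by omega) 0 IH
      by_cases e11 : ([c1, c2] : List Char) = ['n','c']
      · obtain ⟨rfl, rfl⟩ : c1 = 'n' ∧ c2 = 'c' := by simpa using e11
        have hA : modIdCalLoopA ('n'::'c'::rest) total (pickOf used)
            = (if (pickOf used).getD 3 0 = 0 then modIdCalLoopA rest (total + 64) ((pickOf used).set 3 1) else -1) := by
          simp [modIdCalLoopA]
        have hget : PySem.Dict.get? modTable ['n','c'] = some ((3:Int),(64:Int)) := by decide
        rw [hA]; simp only [parseB]; rw [hget]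
        simpa using step_eq rest used total 3 (by omega) 64 IH
      by_cases e12 : ([c1, c2] : List Char) = ['N','C']
      · obtain ⟨rfl, rfl⟩ : c1 = 'N' ∧ c2 = 'C' := by simpa using e12
        have hA : modIdCalLoopA ('N'::'C'::rest) total (pickOf used)
            = (if (pickOf used).getD 3 0 = 0 then modIdCalLoopA rest (total + 64) ((pickOf used).set 3 1) else -1) := by
          simp [modIdCalLoopA]
        have hget : PySem.Dict.get? modTable ['N','C'] = some ((3:Int),(64:Int)) := by decide
        rw [hA]; simp only [parseB]; rw [hget]
        simpa using step_eq rest used total 3 (by omega) 64 IH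
      by_cases e13 : ([c1, c2] : List Char) = ['d','t']
      · obtain ⟨rfl, rfl⟩ : c1 = 'd' ∧ c2 = 't' := by simpa using e13
        have hA : modIdCalLoopA ('d'::'t'::rest) total (pickOf used)
            = (if (pickOf used).getD 3 0 = 0 then modIdCalLoopA rest (total + 64) ((pickOf used).set 3 1) else -1) := by
          simp [modIdCalLoopA]
        have hget : PySem.Dict.get? modTable ['d','t'] = some ((3:Int),(64:Int)) := by decide
        rw [hA]; simp only [parseB]; rw [hget]
        simpa using step_eq rest used total 3 (by omega) 64 IH
      by_cases e14 : ([c1, c2] : List Char) = ['D','T']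
      · obtain ⟨rfl, rfl⟩ : c1 = 'D' ∧ c2 = 'T' := by simpa using e14
        have hA : modIdCalLoopA ('D'::'T'::rest) total (pickOf used)
            = (if (pickOf used).getD 3 0 = 0 then modIdCalLoopA rest (total + 64) ((pickOf used).set 3 1) else -1) := by
          simp [modIdCalLoopA]
        have hget : PySem.Dict.get? modTable ['D','T'] = some ((3:Int),(64:Int)) := by decide
        rw [hA]; simp only [parseB]; rw [hget]
        simpa using step_eq rest used total 3 (by omega) 64 IH
      by_cases e15 : ([c1, c2] : List Char) = ['h','t']
      · obtain ⟨rfl, rfl⟩ : c1 = 'h' ∧ c2 = 't' := by simpa using e15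
        have hA : modIdCalLoopA ('h'::'t'::rest) total (pickOf used)
            = (if (pickOf used).getD 3 0 = 0 then modIdCalLoopA rest (total + 256) ((pickOf used).set 3 1) else -1) := by
          simp [modIdCalLoopA]
        have hget : PySem.Dict.get? modTable ['h','t'] = some ((3:Int),(256:Int)) := by decide
        rw [hA]; simp only [parseB]; rw [hget]
        simpa using step_eq rest used total 3 (by omega) 256 IH
      by_cases e16 : ([c1, c2] : List Char) = ['H','T']
      · obtain ⟨rfl, rfl⟩ : c1 = 'H' ∧ c2 = 'T' := by simpa using e16
        have hA : modIdCalLoopA ('H'::'T'::rest) total (pickOf used)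
            = (if (pickOf used).getD 3 0 = 0 then modIdCalLoopA rest (total + 256) ((pickOf used).set 3 1) else -1) := by
          simp [modIdCalLoopA]
        have hget : PySem.Dict.get? modTable ['H','T'] = some ((3:Int),(256:Int)) := by decide
        rw [hA]; simp only [parseB]; rw [hget]
        simpa using step_eq rest used total 3 (by omega) 256 IH
      by_cases e17 : ([c1, c2] : List Char) = ['h','r']
      · obtain ⟨rfl, rfl⟩ : c1 = 'h' ∧ c2 = 'r' := by simpa using e17
        have hA : modIdCalLoopA ('h'::'r'::rest) total (pickOf used)
            = (if (pickOf used).getD 4 0 = 0 then modIdCalLoopA rest (total + 16) ((pickOf used).set 4 1) else -1) := by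
          simp [modIdCalLoopA]
        have hget : PySem.Dict.get? modTable ['h','r'] = some ((4:Int),(16:Int)) := by decide
        rw [hA]; simp only [parseB]; rw [hget]
        simpa using step_eq rest used total 4 (by omega) 16 IH
      by_cases e18 : ([c1, c2] : List Char) = ['H','R']
      · obtain ⟨rfl, rfl⟩ : c1 = 'H' ∧ c2 = 'R' := by simpa using e18
        have hA : modIdCalLoopA ('H'::'R'::rest) total (pickOf used)
            = (if (pickOf used).getD 4 0 = 0 then modIdCalLoopA rest (total + 16) ((pickOf used).set 4 1) else -1) := by
          simp [modIdCalLoopA]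
        have hget : PySem.Dict.get? modTable ['H','R'] = some ((4:Int),(16:Int)) := by decide
        rw [hA]; simp only [parseB]; rw [hget]
        simpa using step_eq rest used total 4 (by omega) 16 IH
      by_cases e19 : ([c1, c2] : List Char) = ['e','z']
      · obtain ⟨rfl, rfl⟩ : c1 = 'e' ∧ c2 = 'z' := by simpa using e19
        have hA : modIdCalLoopA ('e'::'z'::rest) total (pickOf used)
            = (if (pickOf used).getD 4 0 = 0 then modIdCalLoopA rest (total + 2) ((pickOf used).set 4 1) else -1) := by
          simp [modIdCalLoopA]
        have hget : PySem.Dict.get? modTable ['e','z'] = some ((4:Int),(2:Int)) := by decide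
        rw [hA]; simp only [parseB]; rw [hget]
        simpa using step_eq rest used total 4 (by omega) 2 IH
      by_cases e20 : ([c1, c2] : List Char) = ['E','Z']
      · obtain ⟨rfl, rfl⟩ : c1 = 'E' ∧ c2 = 'Z' := by simpa using e20
        have hA : modIdCalLoopA ('E'::'Z'::rest) total (pickOf used)
            = (if (pickOf used).getD 4 0 = 0 then modIdCalLoopA rest (total + 2) ((pickOf used).set 4 1) else -1) := by
          simp [modIdCalLoopA]
        have hget : PySem.Dict.get? modTable ['E','Z'] = some ((4:Int),(2:Int)) := by decide
        rw [hA]; simp only [parseB]; rw [hget]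
        simpa using step_eq rest used total 4 (by omega) 2 IH
      by_cases e21 : ([c1, c2] : List Char) = ['f','l']
      · obtain ⟨rfl, rfl⟩ : c1 = 'f' ∧ c2 = 'l' := by simpa using e21
        have hA : modIdCalLoopA ('f'::'l'::rest) total (pickOf used)
            = (if (pickOf used).getD 5 0 = 0 then modIdCalLoopA rest (total + 1024) ((pickOf used).set 5 1) else -1) := by
          simp [modIdCalLoopA]
        have hget : PySem.Dict.get? modTable ['f','l'] = some ((5:Int),(1024:Int)) := by decide
        rw [hA]; simp only [parseB]; rw [hget]
        simpa using step_eq rest used total 5 (by omega) 1024 IH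
      by_cases e22 : ([c1, c2] : List Char) = ['F','L']
      · obtain ⟨rfl, rfl⟩ : c1 = 'F' ∧ c2 = 'L' := by simpa using e22
        have hA : modIdCalLoopA ('F'::'L'::rest) total (pickOf used)
            = (if (pickOf used).getD 5 0 = 0 then modIdCalLoopA rest (total + 1024) ((pickOf used).set 5 1) else -1) := by
          simp [modIdCalLoopA]
        have hget : PySem.Dict.get? modTable ['F','L'] = some ((5:Int),(1024:Int)) := by decide
        rw [hA]; simp only [parseB]; rw [hget]
        simpa using step_eq rest used total 5 (by omega) 1024 IH
      have hnone : PySem.Dict.get? modTable [c1, c2] = none := by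
        rw [PySem.Dict.get?_eq_none_iff_not_mem_keys]
        intro hk
        simp [modTable, PySem.Dict.keys] at hk
        rcases hk with ⟨rfl,rfl⟩|⟨rfl,rfl⟩|⟨rfl,rfl⟩|⟨rfl,rfl⟩|⟨rfl,rfl⟩|⟨rfl,rfl⟩|⟨rfl,rfl⟩|⟨rfl,rfl⟩|⟨rfl,rfl⟩|⟨rfl,rfl⟩|⟨rfl,rfl⟩|⟨rfl,rfl⟩|⟨rfl,rfl⟩|⟨rfl,rfl⟩|⟨rfl,rfl⟩|⟨rfl,rfl⟩|⟨rfl,rfl⟩|⟨rfl,rfl⟩|⟨rfl,rfl⟩|⟨rfl,rfl⟩|⟨rfl,rfl⟩|⟨rfl,rfl⟩ <;> simp_all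
      have hB : parseB (c1::c2::rest) used = none := by
        simp only [parseB]; rw [hnone]
      have hA : modIdCalLoopA (c1::c2::rest) total (pickOf used) = -1 := by
        simp only [modIdCalLoopA]
        rw [if_neg (not_or.mpr ⟨e1, e2⟩)]
        rw [if_neg (by simp [e3, e4, e5, e6, e7, e8])]
        rw [if_neg (not_or.mpr ⟨e9, e10⟩)]
        rw [if_neg (by simp [e11, e12, e13, e14])]
        rw [if_neg (not_or.mpr ⟨e15, e16⟩)]
        rw [if_neg (not_or.mpr ⟨e17, e18⟩)]
        rw [if_neg (not_or.mpr ⟨e19, e20⟩)]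
        rw [if_neg (not_or.mpr ⟨e21, e22⟩)]
      rw [hA, hB]

-- ===== VERDICT (by name: the statement is the Claim_ definition above) =====
theorem modIdCal_spec : Claim_equal_modIdCal := by
  intro s _
  unfold Spec_modIdCal modIdCal modIdCal_alt
  split_ifs with h1 h2 h3
  · rfl
  · rfl
  · rfl
  · have hp : pickOf [] = [0,0,0,0,0,0] := by simp [pickOf]
    rw [← hp, loop_eq s.toList [] 0]
    cases parseB s.toList [] with
    | none => rfl
    | some r => simp
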